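-- pv_equiv track=rewrite | github.com/Jungjee/RawNet | RawNet1/PyTorch/train_RawNet.py | get_label_dic_Voxceleb
-- ===== SOURCE A (Python) =====
-- def get_label_dic_Voxceleb(l_utt):
-- 	d_label = {}
-- 	idx_counter = 0
-- 	for utt in l_utt:
-- 		spk = utt.split('/')[0]
-- 		if spk not in d_label:
-- 			d_label[spk] = idx_counter
-- 			idx_counter += 1
-- 	return d_label
-- ===== SOURCE B (Python) =====
-- def get_label_dic_Voxceleb(l_utt):
-- 	spks = [utt.split('/')[0] for utt in l_utt]
-- 	first = {spk: i for i, spk in reversed(list(enumerate(spks)))}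
-- 	order = sorted(first, key=first.get)
-- 	return dict(zip(order, range(len(order))))
-- ===== Notes on version B (the rewrite author's own statement) =====
-- stated objective: alternative
-- what changed: Instead of A's single counter-threaded loop with a membership guard, B builds a first-occurrence-index map by overwriting inserts over the reversed enumerated speaker list (no guard, no counter), sorts the distinct speakers by that first index, and zips them with range to build the label dict.
import Mathlib
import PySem

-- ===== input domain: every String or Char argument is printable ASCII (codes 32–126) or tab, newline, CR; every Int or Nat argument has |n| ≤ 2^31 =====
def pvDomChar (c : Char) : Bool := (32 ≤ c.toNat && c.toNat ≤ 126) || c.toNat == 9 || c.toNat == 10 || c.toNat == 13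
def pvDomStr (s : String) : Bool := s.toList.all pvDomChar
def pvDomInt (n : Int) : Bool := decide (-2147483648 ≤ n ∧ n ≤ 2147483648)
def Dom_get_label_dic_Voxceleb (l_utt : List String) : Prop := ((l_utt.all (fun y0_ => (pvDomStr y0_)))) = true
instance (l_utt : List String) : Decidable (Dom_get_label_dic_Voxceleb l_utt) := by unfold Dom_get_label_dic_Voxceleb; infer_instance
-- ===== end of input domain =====

-- B replaces A's counter-threaded guarded loop by set + sort-by-first-index + zip-with-range (alternative decomposition, not faster).

-- ===== PORT A =====
-- utt.split('/')[0]: the separator '/' is nonempty so split? returns some nonempty list;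
-- neither .getD default is ever reached.
def pvSpkOf (utt : String) : String :=
  (PySem.List.pyGet? ((PySem.Str.split? utt "/").getD []) 0).getD ""

def get_label_dic_Voxceleb (l_utt : List String) : List (String × Int) :=
  (l_utt.foldl
    (fun st utt =>
      let spk := pvSpkOf utt
      if st.1.contains spk then st else (st.1.insert spk st.2, st.2 + 1))
    ((PySem.Dict.empty : PySem.Dict String Int), (0 : Int))).1.items

-- ===== PORT B =====
-- first = {spk: i for i, spk in reversed(list(enumerate(spks)))}: overwriting inserts,
-- so each speaker ends mapped to its FIRST index; sorted(first, key=first.get) iterates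
-- the dict's keys (insertion order, modelled exactly by PySem.Dict) and first.get never
-- yields None here since every key is in the dict, hence the .getD 0 is never reached.
def get_label_dic_Voxceleb_alt (l_utt : List String) : List (String × Int) :=
  let spks := l_utt.map (fun utt => pvSpkOf utt)
  let first := ((PySem.List.enumerate spks).reverse).foldl
      (fun d p => d.insert p.2 p.1) (PySem.Dict.empty : PySem.Dict String Int)
  let order := PySem.List.sorted first.keys (fun s => (first.get? s).getD 0)
  (PySem.Dict.ofList (order.zip (PySem.List.pyRange 0 (order.length : Int)))).items

-- ===== PRECONDITION & SPEC =====
def Spec_get_label_dic_Voxceleb (l_utt : List String) (out : List (String × Int)) : Prop := out = get_label_dic_Voxceleb_alt l_utt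
instance (l_utt : List String) (out : List (String × Int)) : Decidable (Spec_get_label_dic_Voxceleb l_utt out) := by unfold Spec_get_label_dic_Voxceleb; infer_instance

-- ===== CLAIM (what is proved, stated in full; the proofs are below) =====
def Claim_equal_get_label_dic_Voxceleb : Prop := ∀ (l_utt : List String), Dom_get_label_dic_Voxceleb l_utt → Spec_get_label_dic_Voxceleb l_utt (get_label_dic_Voxceleb l_utt)

-- ===== LEMMAS AND PROOFS =====

-- the dict that maps the k-th element of s to k
def pvDictOf (s : List String) : PySem.Dict String Int :=
  PySem.Dict.mk ((PySem.List.enumerate s 0).map (fun p => (p.2, p.1)))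

theorem pvKeys_dictOf (s : List String) : (pvDictOf s).keys = s := by
  simp only [pvDictOf, PySem.Dict.keys, List.map_map]
  exact PySem.List.map_snd_enumerate _ _

theorem pvContains_dictOf (s : List String) (x : String) :
    (pvDictOf s).contains x = decide (x ∈ s) := by
  rw [PySem.Dict.contains_eq_decide_mem_keys, pvKeys_dictOf]

theorem pvDictOf_append (s : List String) (x : String) (h : x ∉ s) :
    pvDictOf (s ++ [x]) = (pvDictOf s).insert x (s.length : Int) := by
  apply PySem.Dict.ext
  rw [PySem.Dict.items_insert_of_not_contains]
  · simp [pvDictOf, PySem.List.enumerate_append, PySem.List.enumerate_cons]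
  · rw [pvContains_dictOf]; simp [h]

-- A's loop maintains exactly the first-appearance dict of speakers seen so far
theorem pvLoopA (l : List String) (s : List String) (hs : s.Nodup) :
    (l.foldl
      (fun st utt =>
        let spk := pvSpkOf utt
        if st.1.contains spk then st else (st.1.insert spk st.2, st.2 + 1))
      (pvDictOf s, (s.length : Int)))
    = (pvDictOf ((l.map pvSpkOf).foldl PySem.Set.add s),
       (((l.map pvSpkOf).foldl PySem.Set.add s).length : Int)) := by
  induction l generalizing s with
  | nil => simp
  | cons utt rest ih =>
    simp only [List.foldl_cons, List.map_cons]
    by_cases hx : pvSpkOf utt ∈ s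
    · rw [pvContains_dictOf]
      simp only [hx, decide_true, if_true]
      have hadd : PySem.Set.add s (pvSpkOf utt) = s := by
        simp [PySem.Set.add, PySem.Set.contains, hx]
      rw [hadd] at *
      exact ih s hs
    · rw [pvContains_dictOf]
      simp only [hx, decide_false]
      have hadd : PySem.Set.add s (pvSpkOf utt) = s ++ [pvSpkOf utt] := by
        simp [PySem.Set.add, PySem.Set.contains, hx]
      rw [hadd]
      have hnd : (s ++ [pvSpkOf utt]).Nodup := by
        rw [List.nodup_append]
        refine ⟨hs, List.nodup_singleton _, ?_⟩
        intro a ha b hb heq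
        subst heq
        rw [List.mem_singleton] at hb
        subst hb
        exact hx ha
      have := ih (s ++ [pvSpkOf utt]) hnd
      rw [← pvDictOf_append s _ hx] at *
      simpa [List.length_append] using this

-- the first-appearance dedup of xs is strictly increasing under the first-index key
theorem pvPW (xs : List String) :
    (PySem.Set.ofList xs).Pairwise
      (fun a b => ((PySem.List.index? xs a).getD 0) < ((PySem.List.index? xs b).getD 0)) := by
  induction xs with
  | nil => simp [PySem.Set.ofList]
  | cons x t ih =>
    rw [PySem.Set.ofList_cons]
    constructor
    · intro b hb
      have hb' := List.mem_filter.mp hb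
      have hbT : b ∈ t := (PySem.Set.mem_ofList t b).mp hb'.1
      have hbne : ¬ (b == x) := by simpa using hb'.2
      have hbne' : ¬ ((x == b) = true) := fun h => hbne (by simp [beq_iff_eq] at h ⊢; exact h.symm)
      obtain ⟨n, hn⟩ : ∃ n, List.idxOf? b t = some n := by
        rcases h : List.idxOf? b t with _ | n
        · exact absurd (List.idxOf?_eq_none_iff.mp h) (by simpa using hbT)
        · exact ⟨n, rfl⟩
      simp [PySem.List.index?, List.idxOf?_cons, hbne', hn]
    · have hsub : ((PySem.Set.ofList t).discard x).Sublist (PySem.Set.ofList t) := by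
        simp only [PySem.Set.discard]; exact List.filter_sublist
      refine (ih.sublist hsub).imp_of_mem ?_
      intro a b ha hb hab
      have ha' := List.mem_filter.mp ha
      have hb' := List.mem_filter.mp hb
      have haT : a ∈ t := (PySem.Set.mem_ofList t a).mp ha'.1
      have hbT : b ∈ t := (PySem.Set.mem_ofList t b).mp hb'.1
      have hane : ¬ ((x == a) = true) := by
        have := ha'.2; simp only [Bool.not_eq_eq_eq_not, Bool.not_true, beq_eq_false_iff_ne] at this
        simp [beq_iff_eq]; exact fun h => this h.symm
      have hbne : ¬ ((x == b) = true) := by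
        have := hb'.2; simp only [Bool.not_eq_eq_eq_not, Bool.not_true, beq_eq_false_iff_ne] at this
        simp [beq_iff_eq]; exact fun h => this h.symm
      obtain ⟨n, hn⟩ : ∃ n, List.idxOf? a t = some n := by
        rcases h : List.idxOf? a t with _ | n
        · exact absurd (List.idxOf?_eq_none_iff.mp h) (by simpa using haT)
        · exact ⟨n, rfl⟩
      obtain ⟨m, hm⟩ : ∃ m, List.idxOf? b t = some m := by
        rcases h : List.idxOf? b t with _ | m
        · exact absurd (List.idxOf?_eq_none_iff.mp h) (by simpa using hbT)
        · exact ⟨m, rfl⟩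
      simp only [PySem.List.index?, hn, hm, Option.getD_some] at hab
      simp [PySem.List.index?, List.idxOf?_cons, hane, hbne, hn, hm]
      omega

-- swap-enumerate is zip-with-range
theorem pvZipRange (u : List String) (s : Int) :
    (PySem.List.enumerate u s).map (fun p => (p.2, p.1))
      = u.zip (PySem.List.pyRange s (s + (u.length : Int))) := by
  induction u generalizing s with
  | nil => simp [PySem.List.enumerate_nil]
  | cons x t ih =>
    have hlen : (((x :: t).length : Nat) : Int) = (t.length : Int) + 1 := by
      push_cast [List.length_cons]; ring
    rw [PySem.List.enumerate_cons, List.map_cons, hlen,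
        PySem.List.pyRange_one_cons (show s < s + ((t.length : Int) + 1) by omega),
        List.zip_cons_cons,
        show s + ((t.length : Int) + 1) = s + 1 + (t.length : Int) by omega,
        ih (s + 1)]

-- the first-occurrence-index dict, as built back-to-front
def pvFirst : List String → Int → PySem.Dict String Int
  | [], _ => PySem.Dict.empty
  | x :: t, s => (pvFirst t (s + 1)).insert x s

theorem pvFoldr_first (u : List String) (s : Int) :
    (PySem.List.enumerate u s).foldr (fun p d => d.insert p.2 p.1)
        (PySem.Dict.empty : PySem.Dict String Int) = pvFirst u s := by
  induction u generalizing s with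
  | nil => simp [PySem.List.enumerate_nil, pvFirst]
  | cons x t ih => rw [PySem.List.enumerate_cons, List.foldr_cons, ih (s + 1)]; rfl

theorem pvGet_first (u : List String) (s : Int) (y : String) :
    (pvFirst u s).get? y = Option.map (fun n : Nat => s + (n : Int)) (List.idxOf? y u) := by
  induction u generalizing s with
  | nil => simp [pvFirst, PySem.Dict.get?, PySem.Dict.empty]
  | cons x t ih =>
    by_cases hy : y = x
    · subst hy
      rw [pvFirst, PySem.Dict.get?_insert_self]
      simp [List.idxOf?_cons]
    · rw [pvFirst, PySem.Dict.get?_insert_of_ne _ _ hy, ih (s + 1)]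
      have hxy : ¬ ((x == y) = true) := by simp [beq_iff_eq]; exact fun h => hy h.symm
      rw [List.idxOf?_cons]
      simp only [hxy]
      cases h : List.idxOf? y t with
      | none => simp
      | some n =>
        simp only [Option.map_some, if_false, Bool.false_eq_true]
        congr 1
        push_cast
        ring

theorem pvContains_first (u : List String) (s : Int) (y : String) :
    (pvFirst u s).contains y = decide (y ∈ u) := by
  rw [PySem.Dict.contains_eq_isSome_get?, pvGet_first]
  rcases h : List.idxOf? y u with _ | n
  · simp [List.idxOf?_eq_none_iff.mp h]
  · have : y ∈ u := by
      by_contra hy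
      rw [List.idxOf?_eq_none_iff.mpr hy] at h
      exact absurd h (by simp)
    simp [this]

theorem pvKeys_first (u : List String) (s : Int) :
    (pvFirst u s).keys.Perm (PySem.Set.ofList u) := by
  induction u generalizing s with
  | nil => simp [pvFirst, PySem.Dict.keys, PySem.Dict.empty, PySem.Set.ofList]
  | cons x t ih =>
    rw [PySem.Set.ofList_cons, pvFirst]
    by_cases hx : x ∈ t
    · rw [PySem.Dict.keys_insert_of_contains]
      · have hmem : x ∈ PySem.Set.ofList t := (PySem.Set.mem_ofList t x).mpr hx
        have hperm : (PySem.Set.ofList t).Perm (x :: (PySem.Set.ofList t).erase x) :=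
          List.perm_cons_erase hmem
        have herase : (PySem.Set.ofList t).erase x = (PySem.Set.ofList t).discard x := by
          rw [(PySem.Set.nodup_ofList t).erase_eq_filter x]
          rfl
        rw [herase] at hperm
        exact ((ih (s + 1)).trans hperm)
      · rw [pvContains_first]; simp [hx]
    · rw [PySem.Dict.keys_insert_of_not_contains]
      · have hdis : (PySem.Set.ofList t).discard x = PySem.Set.ofList t := by
          apply List.filter_eq_self.mpr
          intro a ha
          have : a ∈ t := (PySem.Set.mem_ofList t a).mp ha
          have : a ≠ x := fun h => hx (h ▸ this)
          simp [this]
        rw [hdis]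
        exact (List.perm_append_singleton x _).trans ((ih (s + 1)).cons x)
      · rw [pvContains_first]; simp [hx]

-- B's dict(zip(order, range(len(order)))) has exactly the first-appearance pairs as items
theorem pvAltEq (l_utt : List String) :
    get_label_dic_Voxceleb_alt l_utt
      = (PySem.Set.ofList (l_utt.map pvSpkOf)).zip
          (PySem.List.pyRange 0 ((PySem.Set.ofList (l_utt.map pvSpkOf)).length : Int)) := by
  show (PySem.Dict.ofList _).items = _
  have hfold : ((PySem.List.enumerate (l_utt.map pvSpkOf)).reverse).foldl
      (fun d p => d.insert p.2 p.1) (PySem.Dict.empty : PySem.Dict String Int)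
      = pvFirst (l_utt.map pvSpkOf) 0 := by
    rw [List.foldl_reverse]; exact pvFoldr_first _ _
  rw [hfold]
  set spks := l_utt.map pvSpkOf with hspks
  -- the sort puts the distinct speakers back into first-appearance order
  have hpw : (PySem.Set.ofList spks).Pairwise
      (fun a b => ((pvFirst spks 0).get? a).getD 0 < ((pvFirst spks 0).get? b).getD 0) := by
    refine (pvPW spks).imp_of_mem ?_
    intro a b ha hb hab
    have haS : a ∈ spks := (PySem.Set.mem_ofList spks a).mp ha
    have hbS : b ∈ spks := (PySem.Set.mem_ofList spks b).mp hb
    obtain ⟨n, hn⟩ : ∃ n, List.idxOf? a spks = some n := by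
      rcases h : List.idxOf? a spks with _ | n
      · exact absurd (List.idxOf?_eq_none_iff.mp h) (by simpa using haS)
      · exact ⟨n, rfl⟩
    obtain ⟨m, hm⟩ : ∃ m, List.idxOf? b spks = some m := by
      rcases h : List.idxOf? b spks with _ | m
      · exact absurd (List.idxOf?_eq_none_iff.mp h) (by simpa using hbS)
      · exact ⟨m, rfl⟩
    simp only [PySem.List.index?, hn, hm, Option.getD_some] at hab
    rw [pvGet_first, pvGet_first, hn, hm]
    simp only [Option.map_some, Option.getD_some]
    omega
  have horder : PySem.List.sorted (pvFirst spks 0).keys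
      (fun s => ((pvFirst spks 0).get? s).getD 0) = PySem.Set.ofList spks :=
    PySem.List.sorted_eq_of_perm_of_pairwise_lt _ _ _
      ((pvKeys_first spks 0).symm) hpw
  rw [horder]
  have hlen : (PySem.List.pyRange 0 (((PySem.Set.ofList spks).length : Nat) : Int)).length
      = (PySem.Set.ofList spks).length := by
    rw [PySem.List.length_pyRange_one]; omega
  have hfresh := PySem.Dict.items_foldl_insert_fresh
      (l := (PySem.Set.ofList spks).zip
              (PySem.List.pyRange 0 (((PySem.Set.ofList spks).length : Nat) : Int)))
      (k := Prod.fst) (v := Prod.snd) (d := (PySem.Dict.empty : PySem.Dict String Int))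
      (by intro a _; exact PySem.Dict.contains_empty _)
      (by rw [List.map_fst_zip (by rw [hlen])]; exact PySem.Set.nodup_ofList _)
  show (PySem.Dict.empty.update _).items = _
  rw [PySem.Dict.update] at *
  rw [hfresh]
  simp [PySem.Dict.empty]

-- ===== VERDICT (by name: the statement is the Claim_ definition above) =====
theorem get_label_dic_Voxceleb_spec : Claim_equal_get_label_dic_Voxceleb := by
  intro l_utt _
  show get_label_dic_Voxceleb l_utt = get_label_dic_Voxceleb_alt l_utt
  rw [pvAltEq]
  unfold get_label_dic_Voxceleb
  have h0 : (PySem.Dict.empty : PySem.Dict String Int) = pvDictOf [] := by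
    apply PySem.Dict.ext; simp [pvDictOf, PySem.Dict.empty]
  rw [h0]
  have hloop := pvLoopA l_utt [] List.nodup_nil
  simp only [List.length_nil, Nat.cast_zero] at hloop
  rw [hloop]
  rw [← PySem.Set.ofList_eq_foldl]
  have := pvZipRange (PySem.Set.ofList (l_utt.map pvSpkOf)) 0
  rw [zero_add] at this
  rw [← this]
  rfl
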